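-- pv_equiv track=rewrite | github.com/Kinfe123/cp-dummies | 2126-destroying-asteroids/2126-destroying-asteroids.py | asteroidsDestroyed
-- ===== SOURCE A (Python) =====
-- from typing import List
--
-- def asteroidsDestroyed(mass: int, nums: List[int]) -> bool:
--     masses = mass
--     nums.sort()
--     flag = []
--     for i in range(len(nums)):
--         if masses >= nums[i]:
--             masses+=nums[i]
--             flag.append(True)
--         else:
--             flag.append(False)
--
--     return all(flag)
-- ===== SOURCE B (Python) =====
-- def asteroidsDestroyed(mass, nums):
--     nums.sort()
--     cums = [mass]
--     for x in nums:
--         cums.append(cums[-1] + x)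
--     return all(cums[i] >= nums[i] for i in range(len(nums)))
-- ===== Notes on version B (the rewrite author's own statement) =====
-- stated objective: alternative
-- what changed: Replaces the interleaved conditional-accumulation loop (grow mass only on success, collect per-step flags, all(flags)) by a two-phase decomposition: first build the unconditional prefix-sum table cums (cums[i] = mass + sum of the i smallest asteroids), then a separate comparison pass all(cums[i] >= nums[i]).
import Mathlib
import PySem

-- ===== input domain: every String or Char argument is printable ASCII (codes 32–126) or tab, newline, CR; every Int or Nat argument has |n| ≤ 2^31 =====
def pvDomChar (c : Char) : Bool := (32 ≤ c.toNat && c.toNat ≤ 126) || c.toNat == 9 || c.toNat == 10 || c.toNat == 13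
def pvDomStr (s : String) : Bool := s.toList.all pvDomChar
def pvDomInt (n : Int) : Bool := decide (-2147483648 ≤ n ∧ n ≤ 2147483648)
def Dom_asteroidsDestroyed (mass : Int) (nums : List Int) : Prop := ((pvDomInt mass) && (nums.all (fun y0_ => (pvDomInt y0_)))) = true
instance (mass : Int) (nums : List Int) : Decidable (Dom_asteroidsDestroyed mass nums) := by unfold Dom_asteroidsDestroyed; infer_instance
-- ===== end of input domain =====

-- B replaces A's single interleaved greedy loop by a prefix-sum table plus a separate
-- comparison pass (alternative decomposition, same cost). Both sort; the equivalence
-- proved is about the RETURN value (both Pythons sort nums in place identically).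

-- ===== PORT A =====
def asteroidsDestroyed (mass : Int) (nums : List Int) : Bool :=
  let s := PySem.List.sorted nums (fun x => x) false
  let st := (PySem.List.pyRange 0 (PySem.List.len s) 1).foldl
    (fun (st : Int × List Bool) i =>
      let x := PySem.List.pyGetD s i 0  -- nums[i], always in range for i in range(len(nums))
      if st.1 ≥ x then (st.1 + x, st.2 ++ [true]) else (st.1, st.2 ++ [false]))
    (mass, ([] : List Bool))
  st.2.all id

-- ===== PORT B =====
def asteroidsDestroyed_alt (mass : Int) (nums : List Int) : Bool :=
  let s := PySem.List.sorted nums (fun x => x) false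
  let cums := s.foldl (fun (c : List Int) x => c ++ [PySem.List.pyGetD c (-1) 0 + x]) [mass]
  ((PySem.List.pyRange 0 (PySem.List.len s) 1).map
    (fun i => decide (PySem.List.pyGetD cums i 0 ≥ PySem.List.pyGetD s i 0))).all id

-- ===== PRECONDITION & SPEC =====
def Spec_asteroidsDestroyed (mass : Int) (nums : List Int) (out : Bool) : Prop := out = asteroidsDestroyed_alt mass nums
instance (mass : Int) (nums : List Int) (out : Bool) : Decidable (Spec_asteroidsDestroyed mass nums out) := by unfold Spec_asteroidsDestroyed; infer_instance

-- ===== CLAIM (what is proved, stated in full; the proofs are below) =====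
def Claim_equal_asteroidsDestroyed : Prop := ∀ (mass : Int) (nums : List Int), Dom_asteroidsDestroyed mass nums → Spec_asteroidsDestroyed mass nums (asteroidsDestroyed mass nums)

-- ===== LEMMAS AND PROOFS =====

-- the flag list A's loop builds (proof-only characterisation)
def pvFlags (m : Int) : List Int → List Bool
  | [] => []
  | x :: xs => if m ≥ x then true :: pvFlags (m + x) xs else false :: pvFlags m xs

-- the prefix-sum table B builds: scanl (+) m xs (proof-only characterisation)
def pvScan (m : Int) : List Int → List Int
  | [] => [m]
  | x :: xs => m :: pvScan (m + x) xs

theorem pvFoldA_eq (s : List Int) : ∀ (m : Int) (fl : List Bool),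
    (s.foldl (fun (st : Int × List Bool) x =>
        if st.1 ≥ x then (st.1 + x, st.2 ++ [true]) else (st.1, st.2 ++ [false]))
      (m, fl)).2 = fl ++ pvFlags m s := by
  induction s with
  | nil => simp [pvFlags]
  | cons x xs ih =>
      intro m fl
      by_cases h : m ≥ x <;> simp [List.foldl, h, pvFlags, ih]

theorem pvFoldB_eq (s : List Int) : ∀ (pre : List Int) (m : Int),
    s.foldl (fun (c : List Int) x => c ++ [PySem.List.pyGetD c (-1) 0 + x]) (pre ++ [m])
      = pre ++ pvScan m s := by
  induction s with
  | nil => simp [pvScan]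
  | cons x xs ih =>
      intro pre m
      have : (pre ++ [m]) ++ [PySem.List.pyGetD (pre ++ [m]) (-1) 0 + x]
          = (pre ++ [m]) ++ [m + x] := by
        rw [PySem.List.pyGetD_neg_one_append_singleton]
      simp only [List.foldl, this]
      have := ih (pre ++ [m]) (m + x)
      simpa [pvScan] using this

theorem pvChecks_eq (s : List Int) : ∀ (m : Int),
    ((List.range s.length).all
        (fun k => decide (s[k]?.getD 0 ≤ (pvScan m s)[k]?.getD 0)))
      = (pvFlags m s).all id := by
  induction s with
  | nil => intro m; simp [pvFlags]
  | cons x xs ih =>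
      intro m
      rw [List.length_cons, List.range_succ_eq_map]
      by_cases h : x ≤ m
      · simp only [pvScan, pvFlags, h, if_true, List.all_cons, List.all_map, Function.comp_def,
          List.getElem?_cons_zero, Option.getD_some, List.getElem?_cons_succ, id]
        simp only [decide_true, Bool.true_and]
        exact ih (m + x)
      · simp [pvScan, pvFlags, h, List.all_map, Function.comp_def]

-- ===== VERDICT (by name: the statement is the Claim_ definition above) =====
theorem asteroidsDestroyed_spec : Claim_equal_asteroidsDestroyed := by
  intro mass nums _
  unfold Spec_asteroidsDestroyed asteroidsDestroyed asteroidsDestroyed_alt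
  set s := PySem.List.sorted nums (fun x => x) false with hs
  have hA := PySem.List.foldl_pyRange_zero_pyGetD s 0
    (fun (st : Int × List Bool) x =>
      if st.1 ≥ x then (st.1 + x, st.2 ++ [true]) else (st.1, st.2 ++ [false]))
    (mass, ([] : List Bool))
  have hB : s.foldl (fun (c : List Int) x => c ++ [PySem.List.pyGetD c (-1) 0 + x]) [mass]
      = pvScan mass s := by
    simpa using pvFoldB_eq s [] mass
  simp only [hA, hB, pvFoldA_eq s mass [], List.nil_append]
  rw [PySem.List.pyRange_one]
  simp [PySem.List.len_eq, List.map_map, Function.comp_def, ← pvChecks_eq s mass]
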